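-- pv_equiv track=rewrite | github.com/swordsgnat/Picklerobot_Exercise | Exercise.py | format_with_hyphens
-- ===== SOURCE A (Python) =====
-- def format_with_hyphens(input_string):
--     """
--     Return a version of the input string with a pattern of hyphens inserted that matches the
--     usual patter of hyphens for phone numbers
--     :param input_string: the string to modify
--     :return: the modified version of the string
--     """
--     return_string = ""
--     chunk_counter = 0
--     for char_index in range(len(input_string)):
--         curr_char = input_string[char_index]
--         return_string += curr_char
--         chunk_counter += 1
--         # don't put any hyphens at the end
--         if char_index != len(input_string) - 1:
--             # leading ones in US phone numbers are "long distance", and are often offset by hyphens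
--             if char_index == 0 and curr_char == "1":
--                 return_string += "-"
--                 # make sure the 1 isn't counted for the every-three-numbers-get-a-hyphen purposes
--                 chunk_counter -= 1
--             # usually every three numbers is offset with a hyphen
--             elif chunk_counter == 3:
--                 return_string += "-"
--                 chunk_counter = 0
--
--     return return_string
-- ===== SOURCE B (Python) =====
-- def format_with_hyphens(input_string):
--     if input_string.startswith("1") and len(input_string) > 1:
--         head, rest = "1-", input_string[1:]
--     else:
--         head, rest = "", input_string
--     chunks = [rest[i:i + 3] for i in range(0, len(rest), 3)]
--     return head + "-".join(chunks)
-- ===== Notes on version B (the rewrite author's own statement) =====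
-- stated objective: simpler
-- what changed: Replaces the char-by-char loop with a hyphen counter by peeling an optional leading long-distance one as a head and then slicing the rest into 3-character chunks joined with hyphens.
import Mathlib
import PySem

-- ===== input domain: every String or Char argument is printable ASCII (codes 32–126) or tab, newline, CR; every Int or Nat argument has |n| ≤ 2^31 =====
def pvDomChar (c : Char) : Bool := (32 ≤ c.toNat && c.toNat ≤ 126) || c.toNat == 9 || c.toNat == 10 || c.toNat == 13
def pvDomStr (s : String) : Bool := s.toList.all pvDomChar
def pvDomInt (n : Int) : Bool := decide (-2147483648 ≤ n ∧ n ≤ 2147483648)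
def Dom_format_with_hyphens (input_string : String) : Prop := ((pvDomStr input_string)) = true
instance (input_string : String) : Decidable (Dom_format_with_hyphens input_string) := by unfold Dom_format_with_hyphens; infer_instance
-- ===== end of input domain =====

-- B builds the result as an optional "1-" head plus 3-character slices joined by "-", instead of A's
-- char-by-char accumulation with a chunk counter; same return value on every string (proved total).

-- ===== PORT A =====
-- loop body of A, extracted as a helper (state = (return_string, chunk_counter))
def pvBodyA (s : List Char) (st : List Char × Int) (char_index : Int) : List Char × Int :=
  let curr_char := PySem.List.pyGetD s char_index ' '
  let return_string := st.1 ++ [curr_char]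
  let chunk_counter := st.2 + 1
  if char_index ≠ PySem.Chars.len s - 1 then
    if char_index = 0 ∧ curr_char = '1' then (return_string ++ ['-'], chunk_counter - 1)
    else if chunk_counter = 3 then (return_string ++ ['-'], 0)
    else (return_string, chunk_counter)
  else (return_string, chunk_counter)

def format_with_hyphens (input_string : String) : String :=
  let s := input_string.toList
  String.ofList
    (((PySem.List.pyRange 0 (PySem.Chars.len s) 1).foldl (pvBodyA s) ([], 0)).1)

-- ===== PORT B =====
def format_with_hyphens_alt (input_string : String) : String :=
  let s := input_string.toList
  let hr : List Char × List Char :=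
    if PySem.Chars.startswith s ['1'] = true ∧ PySem.Chars.len s > 1
    then (['1', '-'], PySem.List.slice s (some 1) none)
    else ([], s)
  let chunks := (PySem.List.pyRange 0 (PySem.Chars.len hr.2) 3).map
    (fun i => PySem.List.slice hr.2 (some i) (some (i + 3)))
  String.ofList (hr.1 ++ PySem.Chars.join ['-'] chunks)

-- ===== PRECONDITION & SPEC =====
def Spec_format_with_hyphens (input_string : String) (out : String) : Prop := out = format_with_hyphens_alt input_string
instance (input_string : String) (out : String) : Decidable (Spec_format_with_hyphens input_string out) := by unfold Spec_format_with_hyphens; infer_instance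

-- ===== CLAIM (what is proved, stated in full; the proofs are below) =====
def Claim_equal_format_with_hyphens : Prop := ∀ (input_string : String), Dom_format_with_hyphens input_string → Spec_format_with_hyphens input_string (format_with_hyphens input_string)

-- ===== LEMMAS AND PROOFS =====

-- the output A's tail loop (positions >= 1) produces, by structural recursion
def specA : List Char → Int → List Char
  | [], _ => []
  | [x], _ => [x]
  | x :: y :: t, cc => if cc + 1 = 3 then x :: '-' :: specA (y :: t) 0 else x :: specA (y :: t) (cc + 1)

-- 3-character chunks, structurally
def chunk3 : List Char → List (List Char)
  | [] => []
  | x :: t => (x :: t.take 2) :: chunk3 (t.drop 2)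
termination_by l => l.length
decreasing_by simp

lemma pyRange3_nil (a b : Int) (h : b ≤ a) : PySem.List.pyRange a b 3 = [] := by
  rw [PySem.List.pyRange_of_pos a b (by norm_num)]
  simp [show ¬ a < b by omega]

lemma pyRange3_cons (a b : Int) (h : a < b) :
    PySem.List.pyRange a b 3 = a :: PySem.List.pyRange (a + 3) b 3 := by
  rw [PySem.List.pyRange_of_pos a b (by norm_num),
      PySem.List.pyRange_of_pos (a + 3) b (by norm_num)]
  by_cases h3 : a + 3 < b
  · have he : ((b - a + 3 - 1) / 3).toNat = ((b - (a + 3) + 3 - 1) / 3).toNat + 1 := by omega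
    simp only [if_pos h, if_pos h3, he, List.range_succ_eq_map, List.map_cons, List.map_map]
    refine List.cons_eq_cons.mpr ⟨by simp, ?_⟩
    apply List.map_congr_left; intro k _
    simp only [Function.comp_apply]
    push_cast; ring
  · have he : ((b - a + 3 - 1) / 3).toNat = 1 := by omega
    simp [if_pos h, if_neg h3, he, List.range_succ]

lemma chunksEq (n : Nat) : ∀ (l full : List Char) (k : Nat), l.length ≤ n → full.drop k = l →
    (PySem.List.pyRange (k : Int) (full.length : Int) 3).map
      (fun i => PySem.List.slice full (some i) (some (i + 3))) = chunk3 l := by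
  induction n with
  | zero =>
    intro l full k hn hd
    have hl : l = [] := List.eq_nil_of_length_eq_zero (by omega)
    subst hl
    have : (full.length : Int) ≤ (k : Int) := by
      have := List.drop_eq_nil_iff.mp hd; exact_mod_cast this
    rw [pyRange3_nil _ _ this]; simp [chunk3]
  | succ n ih =>
    intro l full k hn hd
    match l with
    | [] =>
      have : (full.length : Int) ≤ (k : Int) := by
        have := List.drop_eq_nil_iff.mp hd; exact_mod_cast this
      rw [pyRange3_nil _ _ this]; simp [chunk3]
    | x :: t =>
      have hk : k < full.length := by
        by_contra hk
        rw [List.drop_eq_nil_of_le (by omega)] at hd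
        exact (List.cons_ne_nil x t) hd.symm
      rw [pyRange3_cons _ _ (by exact_mod_cast hk), List.map_cons]
      have h3 : ((k : Int) + 3) = ((k + 3 : Nat) : Int) := by push_cast; ring
      rw [h3, PySem.List.slice_natCast, hd]
      have hdrop : full.drop (k + 3) = t.drop 2 := by
        rw [← List.drop_drop, hd]; simp
      have hlen : (t.drop 2).length ≤ n := by simp at hn ⊢; omega
      rw [ih (t.drop 2) full (k + 3) hlen hdrop]
      simp only [chunk3]
      simp [List.take_succ_cons]

lemma specA_short (l : List Char) (h : l.length ≤ 3) : specA l 0 = l := by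
  match l with
  | [] => rfl
  | [a] => rfl
  | [a, b] => simp [specA]
  | [a, b, c] => simp [specA]
  | a :: b :: c :: d :: t => simp at h; omega

lemma specA_step (l : List Char) (h : 3 < l.length) :
    specA l 0 = l.take 3 ++ '-' :: specA (l.drop 3) 0 := by
  match l with
  | [] | [a] | [a, b] | [a, b, c] => simp at h
  | a :: b :: c :: d :: t => simp [specA]

lemma joinEq (n : Nat) : ∀ (l : List Char), l.length ≤ n → l ≠ [] →
    PySem.Chars.join ['-'] (chunk3 l) = specA l 0 := by
  induction n with
  | zero =>
    intro l hn h
    exact absurd (List.eq_nil_of_length_eq_zero (by omega)) h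
  | succ n ih =>
    intro l hn h
    match l with
    | [] => exact absurd rfl h
    | x :: t =>
      by_cases h3 : 3 < (x :: t).length
      · rw [specA_step _ h3]
        have ht : t.drop 2 ≠ [] := by
          intro he; have := congrArg List.length he; simp at this h3; omega
        have hji : PySem.Chars.join ['-'] (chunk3 (t.drop 2)) = specA (t.drop 2) 0 :=
          ih (t.drop 2) (by simp at hn ⊢; omega) ht
        obtain ⟨z, r, he⟩ : ∃ z r, t.drop 2 = z :: r := by
          match he2 : t.drop 2 with
          | [] => exact absurd he2 ht
          | z :: r => exact ⟨z, r, rfl⟩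
        simp only [chunk3]
        rw [show (x :: t).take 3 = x :: t.take 2 from rfl,
            show (x :: t).drop 3 = t.drop 2 from rfl]
        rw [he] at hji ⊢
        have hcz : chunk3 (z :: r) = (z :: r.take 2) :: chunk3 (r.drop 2) := by
          simp only [chunk3]
        rw [hcz, PySem.Chars.join_cons_cons, ← hcz, hji]
        simp
      · rw [specA_short _ (by omega)]
        have h2 : t.length ≤ 2 := by simp at h3; omega
        have ht : t.drop 2 = [] := by simp; omega
        simp only [chunk3, ht]
        have htake : t.take 2 = t := List.take_of_length_le h2
        simp [PySem.Chars.join_singleton, htake]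

-- A's tail loop (all indices >= 1) produces acc ++ specA rest cc
lemma loopA (full : List Char) : ∀ (l : List Char) (i : Nat) (acc : List Char) (cc : Int),
    full.drop i = l → 0 < i →
    ((PySem.List.pyRange (i : Int) (full.length : Int) 1).foldl
      (pvBodyA full) (acc, cc)).1 = acc ++ specA l cc := by
  intro l
  induction l with
  | nil =>
    intro i acc cc hd hi
    have : (full.length : Int) ≤ (i : Int) := by
      have := List.drop_eq_nil_iff.mp hd; exact_mod_cast this
    rw [PySem.List.pyRange_one_eq_nil this]
    simp [specA]
  | cons x t ih =>
    intro i acc cc hd hi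
    have hk : i < full.length := by
      by_contra hk
      rw [List.drop_eq_nil_of_le (by omega)] at hd
      exact (List.cons_ne_nil x t) hd.symm
    have hlen : full.length = i + t.length + 1 := by
      have := congrArg List.length hd
      rw [List.length_drop] at this
      simp at this; omega
    have hget : PySem.List.pyGetD full (i : Int) ' ' = x := by
      rw [PySem.List.pyGetD_natCast]
      have hsome : full[i]? = some x := by
        have : full[i + 0]? = some x := by rw [← List.getElem?_drop, hd]; rfl
        simpa using this
      simp [List.getD_eq_getElem?_getD, hsome]
    rw [PySem.List.pyRange_one_cons (by exact_mod_cast hk), List.foldl_cons]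
    have hstep : ((i : Int) + 1) = ((i + 1 : Nat) : Int) := by push_cast; ring
    have hd' : full.drop (i + 1) = t := by
      rw [← List.drop_drop, hd]; simp
    match t with
    | [] =>
      have hl2 : full.length = i + 1 := by simpa using hlen
      have hb : pvBodyA full (acc, cc) (i : Int) = (acc ++ [x], cc + 1) := by
        simp only [pvBodyA, hget, PySem.Chars.len_eq]
        rw [if_neg (by simp only [ne_eq, Decidable.not_not]; omega :
          ¬ (i : Int) ≠ (full.length : Int) - 1)]
      rw [hb, hstep, PySem.List.pyRange_one_eq_nil (by omega : (full.length : Int) ≤ ((i + 1 : Nat) : Int))]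
      simp [specA]
    | y :: t' =>
      have hnl : (i : Int) ≠ (full.length : Int) - 1 := by simp at hlen ⊢; omega
      have hnz : ¬ ((i : Int) = 0 ∧ PySem.List.pyGetD full (i : Int) ' ' = '1') := by
        intro hz; omega
      have hb : pvBodyA full (acc, cc) (i : Int) =
          (if cc + 1 = 3 then (acc ++ [x] ++ ['-'], 0) else (acc ++ [x], cc + 1)) := by
        have hnz' : ¬ ((i : Int) = 0 ∧ x = '1') := by intro hz; omega
        simp only [pvBodyA, hget, PySem.Chars.len_eq]
        rw [if_pos hnl, if_neg hnz']
      by_cases h3 : cc + 1 = 3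
      · rw [hb, if_pos h3, hstep, ih (i + 1) _ _ hd' (by omega)]
        simp [specA, h3]
      · rw [hb, if_neg h3, hstep, ih (i + 1) _ _ hd' (by omega)]
        simp [specA, h3]

-- B's chunk-and-join on a non-empty rest equals specA rest 0
lemma B_rest (rest : List Char) (h : rest ≠ []) :
    PySem.Chars.join ['-']
      ((PySem.List.pyRange 0 (PySem.Chars.len rest) 3).map
        (fun i => PySem.List.slice rest (some i) (some (i + 3)))) = specA rest 0 := by
  rw [PySem.Chars.len_eq,
      show (0 : Int) = ((0 : Nat) : Int) from rfl,
      chunksEq rest.length rest rest 0 (le_refl _) (by simp),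
      joinEq rest.length rest (le_refl _) h]
  norm_num

lemma core_eq (l : List Char) :
    ((PySem.List.pyRange 0 (PySem.Chars.len l) 1).foldl (pvBodyA l) ([], 0)).1 =
    (if PySem.Chars.startswith l ['1'] = true ∧ PySem.Chars.len l > 1
     then (['1', '-'], PySem.List.slice l (some 1) none)
     else ([], l)).1 ++
    PySem.Chars.join ['-']
      ((PySem.List.pyRange 0 (PySem.Chars.len
          (if PySem.Chars.startswith l ['1'] = true ∧ PySem.Chars.len l > 1
           then (['1', '-'], PySem.List.slice l (some 1) none)
           else ([], l)).2) 3).map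
        (fun i => PySem.List.slice
          (if PySem.Chars.startswith l ['1'] = true ∧ PySem.Chars.len l > 1
           then (['1', '-'], PySem.List.slice l (some 1) none)
           else ([], l)).2 (some i) (some (i + 3)))) := by
  match l with
  | [] => decide
  | [x] =>
    have hsw : ¬ (PySem.Chars.startswith [x] ['1'] = true ∧ PySem.Chars.len [x] > 1) := by
      intro hz; have := hz.2; rw [PySem.Chars.len_eq] at this; simp at this
    rw [if_neg hsw]
    rw [PySem.Chars.len_eq]
    simp only [List.length_singleton, Nat.cast_one]
    rw [PySem.List.pyRange_one_cons (by norm_num), PySem.List.pyRange_one_eq_nil (by norm_num),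
        pyRange3_cons 0 1 (by norm_num), show (0 : Int) + 3 = 3 from by norm_num,
        pyRange3_nil 3 1 (by norm_num)]
    unfold pvBodyA
    simp [PySem.Chars.len_eq, PySem.List.pyGetD, PySem.List.pyIdx?, PySem.List.pyGet?,
          PySem.Chars.join_singleton, PySem.List.slice]
  | x :: y :: t =>
    rw [PySem.Chars.len_eq]
    rw [PySem.List.pyRange_one_cons
      (by have h0 : 0 < (x :: y :: t).length := by simp
          exact_mod_cast h0), List.foldl_cons]
    have hget : PySem.List.pyGetD (x :: y :: t) 0 ' ' = x := by
      rw [show (0 : Int) = ((0 : Nat) : Int) from rfl, PySem.List.pyGetD_natCast]; rfl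
    have hnl : (0 : Int) ≠ (((x :: y :: t).length : Nat) : Int) - 1 := by simp; omega
    have hd1 : (x :: y :: t).drop 1 = y :: t := rfl
    have hstep : ((0 : Int) + 1) = ((1 : Nat) : Int) := rfl
    by_cases hx : x = '1'
    · -- leading '1'
      have hc : (0 : Int) = 0 ∧ PySem.List.pyGetD (x :: y :: t) 0 ' ' = '1' :=
        ⟨rfl, by rw [hget, hx]⟩
      have hb : pvBodyA (x :: y :: t) (([] : List Char), (0 : Int)) 0 = (['1', '-'], 0) := by
        simp only [pvBodyA, hget, PySem.Chars.len_eq]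
        simp [hx]
        omega
      rw [hb, hstep, loopA (x :: y :: t) (y :: t) 1 _ _ hd1 (by omega)]
      have hsw : PySem.Chars.startswith (x :: y :: t) ['1'] = true ∧
          (((x :: y :: t).length : Nat) : Int) > 1 := by
        constructor
        · rw [PySem.Chars.startswith_iff, hx]; exact ⟨y :: t, rfl⟩
        · push_cast [List.length_cons]; omega
      rw [if_pos hsw]
      have hslice : PySem.List.slice (x :: y :: t) (some 1) none = y :: t :=
        PySem.List.slice_from_one (x :: y :: t)
      simp only [hslice]
      rw [B_rest (y :: t) (List.cons_ne_nil y t)]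
    · -- no leading '1'
      have hc : ¬ ((0 : Int) = 0 ∧ PySem.List.pyGetD (x :: y :: t) 0 ' ' = '1') := by
        intro hz; rw [hget] at hz; exact hx hz.2
      have hb : pvBodyA (x :: y :: t) (([] : List Char), (0 : Int)) 0 = ([x], 1) := by
        simp only [pvBodyA, hget, PySem.Chars.len_eq]
        simp [hx]
      rw [hb, hstep, loopA (x :: y :: t) (y :: t) 1 _ _ hd1 (by omega)]
      have hsw : ¬ (PySem.Chars.startswith (x :: y :: t) ['1'] = true ∧
          (((x :: y :: t).length : Nat) : Int) > 1) := by
        intro hz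
        have h1 := hz.1
        rw [PySem.Chars.startswith_iff] at h1
        obtain ⟨r, hr⟩ := h1
        simp at hr
        exact hx hr.1.symm
      rw [if_neg hsw]
      rw [B_rest (x :: y :: t) (List.cons_ne_nil x _)]
      simp [specA]

-- ===== VERDICT (by name: the statement is the Claim_ definition above) =====
theorem format_with_hyphens_spec : Claim_equal_format_with_hyphens := by
  intro input_string _
  unfold Spec_format_with_hyphens format_with_hyphens format_with_hyphens_alt
  exact congrArg String.ofList (core_eq input_string.toList)
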